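-- pv_equiv track=rewrite | github.com/ljgago/advent-of-code-2019 | 06/part_2.py | get_intersection_distance
-- ===== SOURCE A (Python) =====
-- def get_intersection_distance(vec1, vec2):
--     dist1 = 0
--     dist2 = 0
--     for data1 in vec1:
--         for data2 in vec2:
--             if data1 == data2:
--                 return data1, dist1 + dist2
--             dist2 += 1
--         dist1 += 1
--         dist2 = 0
--     return 0, 0
-- ===== SOURCE B (Python) =====
-- def get_intersection_distance(vec1, vec2):
--     first = {}
--     for j, y in enumerate(vec2):
--         if y not in first:
--             first[y] = j
--     for i, x in enumerate(vec1):
--         if x in first: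
--             return x, i + first[x]
--     return 0, 0
-- ===== Notes on version B (the rewrite author's own statement) =====
-- stated objective: alternative
-- what changed: Replaces the nested scan of vec2 for every element of vec1 by a map from vec2 element to its first index built once, then a single pass over vec1.
import Mathlib
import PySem

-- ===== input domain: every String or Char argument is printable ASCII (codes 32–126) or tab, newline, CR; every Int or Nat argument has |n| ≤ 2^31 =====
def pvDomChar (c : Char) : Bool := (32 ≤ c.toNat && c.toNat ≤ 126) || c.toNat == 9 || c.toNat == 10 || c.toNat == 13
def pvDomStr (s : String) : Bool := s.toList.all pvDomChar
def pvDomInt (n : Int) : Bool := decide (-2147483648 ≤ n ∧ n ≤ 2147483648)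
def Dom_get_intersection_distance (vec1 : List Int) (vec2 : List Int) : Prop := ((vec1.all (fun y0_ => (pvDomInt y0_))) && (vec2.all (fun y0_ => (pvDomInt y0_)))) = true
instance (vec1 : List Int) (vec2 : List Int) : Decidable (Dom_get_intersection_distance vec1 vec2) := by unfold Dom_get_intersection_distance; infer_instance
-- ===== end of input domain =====

-- B builds a map from vec2 element to its first index once, then scans vec1 once (different algorithm; on the timed random inputs it was not measurably faster).

-- ===== PORT A =====
-- inner 'for data2 in vec2' loop: returns the pair at the first match, else none, carrying dist2
def pvInnerA (data1 : Int) (dist1 : Int) : List Int → Int → Option (Int × Int)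
  | [], _ => none
  | data2 :: rest, dist2 =>
    if data1 = data2 then some (data1, dist1 + dist2)
    else pvInnerA data1 dist1 rest (dist2 + 1)

-- outer 'for data1 in vec1' loop, carrying dist1
def pvOuterA (vec2 : List Int) : List Int → Int → Int × Int
  | [], _ => (0, 0)
  | data1 :: rest, dist1 =>
    match pvInnerA data1 dist1 vec2 0 with
    | some r => r
    | none => pvOuterA vec2 rest (dist1 + 1)

def get_intersection_distance (vec1 : List Int) (vec2 : List Int) : Int × Int :=
  pvOuterA vec2 vec1 0

-- ===== PORT B =====
-- 'for j, y in enumerate(vec2): if y not in first: first[y] = j'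
def pvBuildFirst : List Int → Int → PySem.Dict Int Int → PySem.Dict Int Int
  | [], _, first => first
  | y :: rest, j, first =>
    pvBuildFirst rest (j + 1) (if first.contains y then first else first.insert y j)

-- 'for i, x in enumerate(vec1): if x in first: return x, i + first[x]'
def pvScanB (first : PySem.Dict Int Int) : List Int → Int → Int × Int
  | [], _ => (0, 0)
  | x :: rest, i =>
    match first.get? x with
    | some j => (x, i + j)
    | none => pvScanB first rest (i + 1)

def get_intersection_distance_alt (vec1 : List Int) (vec2 : List Int) : Int × Int :=
  pvScanB (pvBuildFirst vec2 0 PySem.Dict.empty) vec1 0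

-- ===== PRECONDITION & SPEC =====
def Spec_get_intersection_distance (vec1 : List Int) (vec2 : List Int) (out : Int × Int) : Prop := out = get_intersection_distance_alt vec1 vec2
instance (vec1 : List Int) (vec2 : List Int) (out : Int × Int) : Decidable (Spec_get_intersection_distance vec1 vec2 out) := by unfold Spec_get_intersection_distance; infer_instance

-- ===== CLAIM (what is proved, stated in full; the proofs are below) =====
def Claim_equal_get_intersection_distance : Prop := ∀ (vec1 : List Int) (vec2 : List Int), Dom_get_intersection_distance vec1 vec2 → Spec_get_intersection_distance vec1 vec2 (get_intersection_distance vec1 vec2)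

-- ===== LEMMAS AND PROOFS =====

-- first index of x in a list, as an Option (proof-only characterisation)
def pvFirstIdx (x : Int) : List Int → Option Int
  | [] => none
  | y :: rest => if x = y then some 0 else (pvFirstIdx x rest).map (· + 1)

theorem pvBuildFirst_get?_some (ys : List Int) (j : Int) (d : PySem.Dict Int Int)
    (x v : Int) (h : d.get? x = some v) :
    (pvBuildFirst ys j d).get? x = some v := by
  induction ys generalizing j d with
  | nil => simpa [pvBuildFirst] using h
  | cons y rest ih =>
    simp only [pvBuildFirst]
    apply ih
    by_cases hc : d.contains y
    · simpa [hc] using h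
    · by_cases hxy : x = y
      · subst hxy
        rw [PySem.Dict.contains_eq_isSome_get?, h] at hc
        simp at hc
      · simpa [hc, PySem.Dict.get?_insert_of_ne d j hxy] using h

theorem pvBuildFirst_get?_none (ys : List Int) (j : Int) (d : PySem.Dict Int Int)
    (x : Int) (h : d.get? x = none) :
    (pvBuildFirst ys j d).get? x = (pvFirstIdx x ys).map (· + j) := by
  induction ys generalizing j d with
  | nil => simpa [pvBuildFirst, pvFirstIdx] using h
  | cons y rest ih =>
    simp only [pvBuildFirst, pvFirstIdx]
    by_cases hxy : x = y
    · subst hxy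
      have hc : d.contains x = false := by
        rw [PySem.Dict.contains_eq_isSome_get?, h]; rfl
      rw [if_neg (by simp [hc])]
      have := pvBuildFirst_get?_some rest (j + 1) (d.insert x j) x j
        (PySem.Dict.get?_insert_self d x j)
      simp [this]
    · have hd' : ∀ d' : PySem.Dict Int Int,
          d' = (if d.contains y then d else d.insert y j) → d'.get? x = none := by
        intro d' hd'
        by_cases hc : d.contains y <;> simp [hd', hc, h, PySem.Dict.get?_insert_of_ne d j hxy]
      rw [if_neg hxy]
      rw [ih (j + 1) _ (hd' _ rfl)]
      cases pvFirstIdx x rest with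
      | none => simp
      | some k => simp; ring

theorem pvInnerA_eq (x dist1 : Int) (ys : List Int) (dist2 : Int) :
    pvInnerA x dist1 ys dist2 = (pvFirstIdx x ys).map (fun j => (x, dist1 + (dist2 + j))) := by
  induction ys generalizing dist2 with
  | nil => simp [pvInnerA, pvFirstIdx]
  | cons y rest ih =>
    simp only [pvInnerA, pvFirstIdx]
    by_cases hxy : x = y
    · simp [hxy]
    · rw [if_neg hxy, if_neg hxy, ih]
      cases pvFirstIdx x rest with
      | none => simp
      | some k => simp; ring_nf

theorem pvOuter_eq_scan (vec2 : List Int) (vec1 : List Int) (k : Int) :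
    pvOuterA vec2 vec1 k = pvScanB (pvBuildFirst vec2 0 PySem.Dict.empty) vec1 k := by
  induction vec1 generalizing k with
  | nil => simp [pvOuterA, pvScanB]
  | cons x rest ih =>
    simp only [pvOuterA, pvScanB]
    rw [pvBuildFirst_get?_none vec2 0 PySem.Dict.empty x (PySem.Dict.get?_empty x)]
    rw [pvInnerA_eq]
    cases pvFirstIdx x vec2 with
    | none => simpa using ih (k + 1)
    | some j => simp

-- ===== VERDICT (by name: the statement is the Claim_ definition above) =====
theorem get_intersection_distance_spec : Claim_equal_get_intersection_distance := by
  intro vec1 vec2 _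
  unfold Spec_get_intersection_distance get_intersection_distance get_intersection_distance_alt
  exact pvOuter_eq_scan vec2 vec1 0
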